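-- pv_equiv track=rewrite | github.com/Shruteek/Optimized-sgRNA-Design | code/GenomeTools.py | convertToDNA
-- ===== SOURCE A (Python) =====
-- def isValidDNA(DNASequence):
--     """Method that returns a boolean representing whether the input sequence is a valid DNA sequence."""
--     if not isinstance(DNASequence, str):
--         return False
--     validDNABasePairs = "ACTGN"
--     for nucleotideIndex in range(len(DNASequence)):
--         if not validDNABasePairs.__contains__(DNASequence[nucleotideIndex]):
--             return False
--     return True
--
-- def isValidRNA(RNASequence):
--     """Method that returns a boolean representing whether the input sequence is a valid RNA sequence."""
--     if not isinstance(RNASequence, str):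
--         return False
--     validRNABasePairs = "ACUG"
--     for nucleotide in RNASequence:
--         if not validRNABasePairs.__contains__(nucleotide):
--             return False
--     return True
--
-- def convertToDNA(sequence):
--     """Method that converts the given input RNA or DNA sequence to DNA."""
--     complement = ""
--     if not (isValidRNA(sequence) or isValidDNA(sequence)):
--         return complement
--     for nucleotide in str.upper(sequence):
--         if nucleotide == "A":
--             complement = complement + "A"
--         elif nucleotide == "C":
--             complement = complement + "C"
--         elif nucleotide == "U":
--             complement = complement + "T"
--         elif nucleotide == "T":
--             complement = complement + "T"
--         elif nucleotide == "G":
--             complement = complement + "G"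
--     return complement
-- ===== SOURCE B (Python) =====
-- def isValidDNA(DNASequence):
--     """Valid DNA: every character is one of A, C, T, G, N."""
--     return all(c in "ACTGN" for c in DNASequence)
--
-- def isValidRNA(RNASequence):
--     """Valid RNA: every character is one of A, C, U, G."""
--     return all(c in "ACUG" for c in RNASequence)
--
-- def convertToDNA(sequence):
--     """Case analysis on sequence type + one whole-string replace, instead of a char-by-char accumulator loop."""
--     if isValidRNA(sequence):
--         return sequence.replace("U", "T")
--     if isValidDNA(sequence):
--         return sequence.replace("N", "")
--     return ""
-- ===== Notes on version B (the rewrite author's own statement) =====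
-- stated objective: simpler
-- what changed: Replaces A's char-by-char 5-way if/elif accumulator loop (after upper()) with a case analysis on sequence type — valid RNA: one whole-string replace('U','T'); valid DNA: one replace('N',''); otherwise '' — reusing validators written with all().
import Mathlib
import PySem

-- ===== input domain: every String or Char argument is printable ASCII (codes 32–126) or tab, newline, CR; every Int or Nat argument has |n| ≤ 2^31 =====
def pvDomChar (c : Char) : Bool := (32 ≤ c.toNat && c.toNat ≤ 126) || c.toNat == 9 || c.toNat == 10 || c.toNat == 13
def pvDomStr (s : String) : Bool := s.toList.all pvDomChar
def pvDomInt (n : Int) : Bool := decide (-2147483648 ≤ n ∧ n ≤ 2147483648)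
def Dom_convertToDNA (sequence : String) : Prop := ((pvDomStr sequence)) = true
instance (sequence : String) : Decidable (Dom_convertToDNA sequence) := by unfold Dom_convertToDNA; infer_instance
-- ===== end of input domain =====

-- B replaces A's char-by-char accumulator loop with a case analysis (RNA / DNA / invalid) plus one whole-string replace; objective: simpler.

-- ===== PORT A =====
-- A's validators are early-return-false for-loops over the characters; ported as a Bool-accumulator foldl
-- (early return False = the && short-circuit), exact on every input.
def isValidDNA_A (DNASequence : String) : Bool :=
  DNASequence.toList.foldl (fun ok c => ok && PySem.Chars.isIn [c] "ACTGN".toList) true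

def isValidRNA_A (RNASequence : String) : Bool :=
  RNASequence.toList.foldl (fun ok c => ok && PySem.Chars.isIn [c] "ACUG".toList) true

def convertToDNA (sequence : String) : String :=
  let complement : String := ""
  if !(isValidRNA_A sequence || isValidDNA_A sequence) then complement
  else
    (PySem.Str.upper sequence).toList.foldl (fun complement nucleotide =>
      if nucleotide = 'A' then complement ++ "A"
      else if nucleotide = 'C' then complement ++ "C"
      else if nucleotide = 'U' then complement ++ "T"
      else if nucleotide = 'T' then complement ++ "T"
      else if nucleotide = 'G' then complement ++ "G"
      else complement) complement

-- ===== PORT B =====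
def isValidDNA_B (DNASequence : String) : Bool :=
  DNASequence.toList.all (fun c => "ACTGN".toList.contains c)

def isValidRNA_B (RNASequence : String) : Bool :=
  RNASequence.toList.all (fun c => "ACUG".toList.contains c)

def convertToDNA_alt (sequence : String) : String :=
  if isValidRNA_B sequence then PySem.Str.replace sequence "U" "T"
  else if isValidDNA_B sequence then PySem.Str.replace sequence "N" ""
  else ""

-- ===== PRECONDITION & SPEC =====
def Spec_convertToDNA (sequence : String) (out : String) : Prop := out = convertToDNA_alt sequence
instance (sequence : String) (out : String) : Decidable (Spec_convertToDNA sequence out) := by unfold Spec_convertToDNA; infer_instance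

-- ===== CLAIM (what is proved, stated in full; the proofs are below) =====
def Claim_equal_convertToDNA : Prop := ∀ (sequence : String), Dom_convertToDNA sequence → Spec_convertToDNA sequence (convertToDNA sequence)

-- ===== LEMMAS AND PROOFS =====

theorem isIn_singleton (c : Char) (l : List Char) :
    PySem.Chars.isIn [c] l = l.contains c := by
  rcases h : l.contains c with _|_
  · rw [PySem.Chars.isIn_eq_false_iff]
    intro hinf
    have := hinf.sublist.mem (List.mem_singleton_self c)
    simp_all
  · rw [PySem.Chars.isIn_iff_infix]
    have hm : c ∈ l := by simp_all
    obtain ⟨s, t, rfl⟩ := List.append_of_mem hm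
    exact ⟨s, t, by simp⟩

theorem foldl_and_eq_all (p : Char → Bool) (l : List Char) (b : Bool) :
    l.foldl (fun ok c => ok && p c) b = (b && l.all p) := by
  induction l generalizing b with
  | nil => simp
  | cons c t ih => simp [List.foldl_cons, ih, Bool.and_assoc]

theorem validRNA_eq (s : String) : isValidRNA_A s = isValidRNA_B s := by
  unfold isValidRNA_A isValidRNA_B
  rw [foldl_and_eq_all]
  simp [isIn_singleton]

theorem validDNA_eq (s : String) : isValidDNA_A s = isValidDNA_B s := by
  unfold isValidDNA_A isValidDNA_B
  rw [foldl_and_eq_all]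
  simp [isIn_singleton]

-- the single-char replace, characterised as a flatMap
theorem replace_go_singleton (u : Char) (new : List Char) (fuel : Nat) (l acc : List Char)
    (h : l.length ≤ fuel) :
    PySem.Chars.replace.go [u] new fuel l acc
      = acc.reverse ++ l.flatMap (fun c => if c = u then new else [c]) := by
  induction l generalizing fuel acc with
  | nil =>
    cases fuel <;> simp [PySem.Chars.replace.go]
  | cons c t ih =>
    cases fuel with
    | zero => simp at h
    | succ f =>
      rw [PySem.Chars.replace.go]
      by_cases hc : c = u
      · subst hc
        simp [List.isPrefixOf, ih f (new.reverse ++ acc) (by simpa using h)]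
      · simp [List.isPrefixOf, hc, ih f (c :: acc) (by simpa using Nat.le_of_succ_le_succ h), beq_iff_eq]
        simp [Ne.symm hc]

theorem replace_singleton (u : Char) (new : List Char) (l : List Char) :
    PySem.Chars.replace l [u] new = l.flatMap (fun c => if c = u then new else [c]) := by
  rw [PySem.Chars.replace]
  simp [replace_go_singleton u new l.length l [] le_rfl]

-- A's loop body characterised on the character list
def convChars : List Char → List Char
  | [] => []
  | c :: t =>
    if c = 'A' then 'A' :: convChars t
    else if c = 'C' then 'C' :: convChars t
    else if c = 'U' then 'T' :: convChars t
    else if c = 'T' then 'T' :: convChars t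
    else if c = 'G' then 'G' :: convChars t
    else convChars t

theorem foldA_toList (l : List Char) (acc : String) :
    (l.foldl (fun complement nucleotide =>
      if nucleotide = 'A' then complement ++ "A"
      else if nucleotide = 'C' then complement ++ "C"
      else if nucleotide = 'U' then complement ++ "T"
      else if nucleotide = 'T' then complement ++ "T"
      else if nucleotide = 'G' then complement ++ "G"
      else complement) acc).toList = acc.toList ++ convChars l := by
  induction l generalizing acc with
  | nil => simp [convChars]
  | cons c t ih =>
    simp only [List.foldl_cons, convChars]
    split_ifs <;> simp [ih]

theorem convChars_rna (l : List Char) (h : ∀ c ∈ l, c ∈ ['A', 'C', 'U', 'G']) :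
    convChars (l.map PySem.Chars.upperChar)
      = l.flatMap (fun c => if c = 'U' then ['T'] else [c]) := by
  induction l with
  | nil => rfl
  | cons c t ih =>
    have hc := h c (List.mem_cons_self ..)
    have hup : PySem.Chars.upperChar c = c := by fin_cases hc <;> decide
    have ht := ih (fun c hm => h c (List.mem_cons_of_mem _ hm))
    simp only [List.map_cons, List.flatMap_cons, hup]
    fin_cases hc <;> simp [convChars, ht]

theorem convChars_dna (l : List Char) (h : ∀ c ∈ l, c ∈ ['A', 'C', 'T', 'G', 'N']) :
    convChars (l.map PySem.Chars.upperChar)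
      = l.flatMap (fun c => if c = 'N' then [] else [c]) := by
  induction l with
  | nil => rfl
  | cons c t ih =>
    have hc := h c (List.mem_cons_self ..)
    have hup : PySem.Chars.upperChar c = c := by fin_cases hc <;> decide
    have ht := ih (fun c hm => h c (List.mem_cons_of_mem _ hm))
    simp only [List.map_cons, List.flatMap_cons, hup]
    fin_cases hc <;> simp [convChars, ht]

-- ===== VERDICT (by name: the statement is the Claim_ definition above) =====
theorem convertToDNA_spec : Claim_equal_convertToDNA := by
  intro s _
  unfold Spec_convertToDNA convertToDNA convertToDNA_alt
  rw [validRNA_eq, validDNA_eq]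
  rcases hr : isValidRNA_B s with _|_
  · rcases hd : isValidDNA_B s with _|_
    · simp
    · -- DNA-valid but not RNA-valid: A's loop = replace 'N' → ''
      simp only [Bool.false_or, Bool.not_true, Bool.false_eq_true, if_false, if_true]
      apply String.toList_inj.mp
      rw [foldA_toList]
      have hm : ∀ c ∈ s.toList, c ∈ ['A', 'C', 'T', 'G', 'N'] := by
        simp only [isValidDNA_B, List.all_eq_true] at hd
        intro c hc
        simpa using hd c hc
      simp [PySem.Str.replace, replace_singleton, PySem.Str.toList_upper, PySem.Chars.upper,
        convChars_dna s.toList hm, String.toList_ofList]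
  · -- RNA-valid: A's loop = replace 'U' → 'T'
    simp only [Bool.true_or, Bool.not_true, Bool.false_eq_true, if_false, ite_true]
    apply String.toList_inj.mp
    rw [foldA_toList]
    have hm : ∀ c ∈ s.toList, c ∈ ['A', 'C', 'U', 'G'] := by
      simp only [isValidRNA_B, List.all_eq_true] at hr
      intro c hc
      simpa using hr c hc
    simp [PySem.Str.replace, replace_singleton, PySem.Str.toList_upper, PySem.Chars.upper,
      convChars_rna s.toList hm, String.toList_ofList]
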